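-- pv_equiv track=rewrite | github.com/mtmbutler/leetcode | solutions/lc_665_non_decreasing_array.py | decreases_consecutively
-- ===== SOURCE A (Python) =====
-- def decreases_consecutively(li):
--     dec_counter = 0
--     last = li[0]
--     for i in li[1:]:
--         if i < last:
--             dec_counter += 1
--         else:
--             dec_counter = 0
--         if dec_counter > 1:
--             return True
--         last = i
--     return False
-- ===== SOURCE B (Python) =====
-- def decreases_consecutively(li):
--     last = li[0]
--     decs = []
--     for i in li[1:]:
--         decs.append(i < last)
--         last = i
--     return any(a and b for a, b in zip(decs, decs[1:]))
-- ===== Notes on version B (the rewrite author's own statement) =====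
-- stated objective: alternative
-- what changed: Replaces the reset-counter with early return by building a list of per-step decrease flags and then scanning it for two adjacent True flags.
import Mathlib
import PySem

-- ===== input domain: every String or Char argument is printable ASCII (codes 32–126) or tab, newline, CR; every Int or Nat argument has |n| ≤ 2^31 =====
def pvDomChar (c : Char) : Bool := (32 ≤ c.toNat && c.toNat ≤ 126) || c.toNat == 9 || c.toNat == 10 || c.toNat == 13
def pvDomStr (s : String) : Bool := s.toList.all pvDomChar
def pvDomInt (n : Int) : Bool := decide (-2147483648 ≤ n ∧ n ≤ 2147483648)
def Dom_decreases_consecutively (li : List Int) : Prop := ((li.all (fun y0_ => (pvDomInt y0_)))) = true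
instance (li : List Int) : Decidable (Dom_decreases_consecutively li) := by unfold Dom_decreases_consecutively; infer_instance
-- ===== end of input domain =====

-- B builds the list of per-step decrease flags, then scans it for two adjacent True
-- flags, instead of A's reset-counter with an early return (objective: alternative).
-- Pre_ excludes the empty list, on which A raises IndexError at its first-element access.

-- ===== PORT A =====
-- the for-loop over li[1:] with state (dec_counter, last) and early return True
def pvALoop (dec_counter : Int) (last : Int) : List Int → Bool
  | [] => false
  | i :: rest =>
    let dc := if i < last then dec_counter + 1 else (0 : Int)
    if dc > 1 then true else pvALoop dc i rest

def decreases_consecutively (li : List Int) : Bool :=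
  match PySem.List.pyGet? li 0 with
  | none => false  -- unreachable under Pre_: Python raises IndexError on []
  | some last => pvALoop 0 last (PySem.List.slice li (some 1) none)

-- ===== PORT B =====
-- the loop building decs (appending 'i < last' and updating last)
def pvBDecs (last : Int) : List Int → List Bool
  | [] => []
  | i :: rest => decide (i < last) :: pvBDecs i rest

-- any(a and b for a, b in zip(decs, decs[1:]))
def pvPairAny (l : List Bool) : Bool :=
  (l.zip (l.drop 1)).any (fun p => p.1 && p.2)

def decreases_consecutively_alt (li : List Int) : Bool :=
  match PySem.List.pyGet? li 0 with
  | none => false  -- unreachable under Pre_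
  | some last => pvPairAny (pvBDecs last (PySem.List.slice li (some 1) none))

-- ===== PRECONDITION & SPEC =====
-- Pre_ excludes only the empty list, on which A raises IndexError at its first-element access.
def Pre_decreases_consecutively (li : List Int) : Prop := li ≠ []
instance (li : List Int) : Decidable (Pre_decreases_consecutively li) := by unfold Pre_decreases_consecutively; infer_instance
def pvWitness_decreases_consecutively : List Int := [3, 2, 1]

def Spec_decreases_consecutively (li : List Int) (out : Bool) : Prop := out = decreases_consecutively_alt li
instance (li : List Int) (out : Bool) : Decidable (Spec_decreases_consecutively li out) := by unfold Spec_decreases_consecutively; infer_instance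

-- ===== CLAIM (what is proved, stated in full; the proofs are below) =====
def Claim_equal_decreases_consecutively : Prop := ∀ (li : List Int), Dom_decreases_consecutively li → Pre_decreases_consecutively li → Spec_decreases_consecutively li (decreases_consecutively li)

-- ===== LEMMAS AND PROOFS =====

-- head flag of the decs list
theorem pvBDecs_head (last : Int) (xs : List Int) :
    ((pvBDecs last xs).head?.getD false) = (match xs with | [] => false | i :: _ => decide (i < last)) := by
  cases xs <;> simp [pvBDecs]

theorem pvPairAny_cons (b : Bool) (bs : List Bool) :
    pvPairAny (b :: bs) = ((b && bs.headD false) || pvPairAny bs) := by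
  cases bs <;> simp [pvPairAny]

-- loop invariant: A's counter loop equals head-test plus adjacent-pair scan of B's flags
theorem pvALoop_eq (xs : List Int) : ∀ (last dc : Int), 0 ≤ dc →
    pvALoop dc last xs
      = ((decide (1 ≤ dc) && (match xs with | [] => false | i :: _ => decide (i < last)))
          || pvPairAny (pvBDecs last xs)) := by
  induction xs with
  | nil => intro last dc _; simp [pvALoop, pvBDecs, pvPairAny]
  | cons i rest ih =>
    intro last dc hdc
    by_cases hlt : i < last
    · by_cases h1 : 1 ≤ dc
      · simp [pvALoop, hlt, h1, show dc + 1 > 1 by omega]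
      · have hdc0 : dc = 0 := by omega
        subst hdc0
        simp only [pvALoop, if_pos hlt, zero_add]
        rw [if_neg (by omega), ih i 1 (by omega)]
        simp [pvBDecs, pvPairAny_cons, pvBDecs_head, hlt]
    · simp only [pvALoop, if_neg hlt]
      rw [if_neg (by omega), ih i 0 (by omega)]
      simp [pvBDecs, pvPairAny_cons, pvBDecs_head, hlt]

-- ===== VERDICT (by name: the statement is the Claim_ definition above) =====
theorem decreases_consecutively_spec : Claim_equal_decreases_consecutively := by
  intro li _ _
  unfold Spec_decreases_consecutively decreases_consecutively decreases_consecutively_alt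
  cases h : PySem.List.pyGet? li 0 with
  | none => rfl
  | some last =>
    simp only []
    rw [pvALoop_eq _ last 0 le_rfl]
    simp
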